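-- pv_equiv track=rewrite | github.com/LZhengg324/LeetCode | Python/demoJudge.py | calculate_y
-- ===== SOURCE A (Python) =====
-- def calculate_y(x):
--     """
--     Calculate the smallest y that maximizes the remainder of x * y % 2024.
--
--     :param x: Positive integer (0 < x < 2024)
--     :return: Smallest positive integer y that satisfies the condition
--     """
--     max_remainder = -1
--     best_y = None
--
--     for y in range(1, 2024):  # y must be a positive integer
--         remainder = (x * y) % 2024
--         if remainder > max_remainder:
--             max_remainder = remainder
--             best_y = y
--
--     return best_y
-- ===== SOURCE B (Python) =====
-- def calculate_y(x):
--     # Closed form: max remainder of (x*y) % 2024 is 2024 - gcd(x, 2024);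
--     # the smallest y reaching it solves the linear congruence x*y = -d (mod 2024).
--     a = x % 2024
--     if a == 0:
--         return 1
--     # gcd(a, 2024) by Euclid
--     d, b = a, 2024
--     while b:
--         d, b = b, d % b
--     m = 2024 // d
--     a0 = a // d
--     # modular inverse of a0 mod m by extended Euclid
--     t, newt, r, newr = 0, 1, m, a0
--     while newr:
--         q = r // newr
--         t, newt = newt, t - q * newt
--         r, newr = newr, r - q * newr
--     inv = t % m
--     return (-inv) % m
-- ===== Notes on version B (the rewrite author's own statement) =====
-- stated objective: alternative
-- what changed: Replaces A's brute-force scan over all 2023 candidate y values by a closed form: the maximum remainder is 2024 - gcd(x, 2024), and the smallest y attaining it is obtained by solving the linear congruence x*y = -gcd (mod 2024) with Euclid's algorithm and an extended-Euclid modular inverse.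
import Mathlib
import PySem

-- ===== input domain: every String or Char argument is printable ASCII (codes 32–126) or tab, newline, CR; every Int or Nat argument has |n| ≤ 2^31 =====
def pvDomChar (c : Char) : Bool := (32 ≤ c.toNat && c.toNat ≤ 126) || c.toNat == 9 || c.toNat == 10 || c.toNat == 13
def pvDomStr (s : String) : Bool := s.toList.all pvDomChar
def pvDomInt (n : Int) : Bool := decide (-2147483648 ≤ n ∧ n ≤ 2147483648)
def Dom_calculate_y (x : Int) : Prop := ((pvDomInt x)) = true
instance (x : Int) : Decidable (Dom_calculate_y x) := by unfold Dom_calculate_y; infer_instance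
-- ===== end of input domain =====

-- B replaces A's 2023-iteration brute-force argmax scan by a closed form:
-- gcd + extended Euclid solving x*y ≡ 2024 - gcd(x,2024) (mod 2024).

-- ===== PORT A =====
def calculate_y (x : Int) : Int :=
  -- for y in range(1, 2024): remainder = (x*y) % 2024; track (max_remainder, best_y)
  (((PySem.List.pyRange 1 2024 1).foldl
      (fun (acc : Int × Option Int) y =>
        let remainder := PySem.Int.mod (x * y) 2024
        if remainder > acc.1 then (remainder, some y) else acc)
      ((-1 : Int), (none : Option Int))).2).getD 0
  -- best_y is always set by the first iteration, so the `none` default is unreachable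

-- ===== PORT B =====
-- `a % b` shrinks `|b|` for every nonzero b (Python's mod takes the divisor's sign);
-- used for termination of B's two Euclid loops.
theorem pvModNatAbsLt (a b : Int) (h : b ≠ 0) :
    (PySem.Int.mod a b).natAbs < b.natAbs := by
  have h1 := PySem.Int.mod_nonneg a (b := b)
  have h2 := PySem.Int.mod_lt a (b := b)
  have h3 := PySem.Int.mod_neg_bounds a (b := b)
  rcases lt_trichotomy b 0 with hb | hb | hb
  · have := h3 hb; omega
  · exact absurd hb h
  · have := h1 hb; have := h2 hb; omega

-- `d, b = a, 2024; while b: d, b = b, d % b`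
def pvGcdLoop (d b : Int) : Int :=
  if h : b = 0 then d else pvGcdLoop b (PySem.Int.mod d b)
termination_by b.natAbs
decreasing_by exact pvModNatAbsLt d b h

-- `t, newt, r, newr = 0, 1, m, a0; while newr: q = r // newr; t, newt = newt, t - q*newt;
--  r, newr = newr, r - q*newr` ; returns the final t
def pvEgcdLoop (t newt r newr : Int) : Int :=
  if h : newr = 0 then t
  else
    let q := PySem.Int.floordiv r newr
    pvEgcdLoop newt (t - q * newt) newr (r - q * newr)
termination_by newr.natAbs
decreasing_by
  have h1 := PySem.Int.floordiv_mul_add_mod r newr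
  have h2 := pvModNatAbsLt r newr h
  omega

def calculate_y_alt (x : Int) : Int :=
  let a := PySem.Int.mod x 2024
  if a = 0 then 1
  else
    let d := pvGcdLoop a 2024
    let m := PySem.Int.floordiv 2024 d
    let a0 := PySem.Int.floordiv a d
    let t := pvEgcdLoop 0 1 m a0
    let inv := PySem.Int.mod t m
    PySem.Int.mod (-inv) m

-- ===== PRECONDITION & SPEC =====
def Spec_calculate_y (x : Int) (out : Int) : Prop := out = calculate_y_alt x
instance (x : Int) (out : Int) : Decidable (Spec_calculate_y x out) := by unfold Spec_calculate_y; infer_instance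

-- ===== CLAIM (what is proved, stated in full; the proofs are below) =====
def Claim_equal_calculate_y : Prop := ∀ (x : Int), Dom_calculate_y x → Spec_calculate_y x (calculate_y x)

-- ===== LEMMAS AND PROOFS =====

theorem intGcdRec (a b : Int) (hb : 0 < b) :
    Int.gcd b (PySem.Int.mod a b) = Int.gcd a b := by
  rw [PySem.Int.mod_eq_emod_of_pos hb, Int.emod_def]
  have : a - b * (a / b) = a + -(a / b) * b := by ring
  rw [this, Int.gcd_add_mul_right_right, Int.gcd_comm]

-- B's first loop is Euclid's algorithm.
theorem pvGcdLoop_eq (d b : Int) : 0 ≤ d → 0 ≤ b → pvGcdLoop d b = (Int.gcd d b : Int) := by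
  induction d, b using pvGcdLoop.induct with
  | case1 d =>
    intro hd _
    rw [pvGcdLoop]
    simp [Int.gcd, Int.natAbs_of_nonneg hd]
  | case2 d b h ih =>
    intro hd hb
    have hbpos : 0 < b := lt_of_le_of_ne hb (Ne.symm h)
    rw [pvGcdLoop]
    simp only [h, dite_false]
    rw [ih hb (PySem.Int.mod_nonneg d hbpos), intGcdRec d b hbpos]

-- B's second loop is the extended Euclidean algorithm: the invariant
-- m ∣ t*a0 - r ∧ m ∣ newt*a0 - newr is preserved, and r ends at gcd = 1.
theorem pvEgcdLoop_inv (m a0 : Int) (t newt r newr : Int) :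
    0 < r → 0 ≤ newr → m ∣ t * a0 - r → m ∣ newt * a0 - newr → Int.gcd r newr = 1 →
    m ∣ (pvEgcdLoop t newt r newr) * a0 - 1 := by
  induction t, newt, r, newr using pvEgcdLoop.induct with
  | case1 t newt r =>
    intro hr hnr ht hnt hg
    rw [pvEgcdLoop]; simp only [dite_true]
    have : r = 1 := by
      have := hg; simp [Int.gcd] at this; omega
    rw [this] at ht; exact ht
  | case2 t newt r newr h q ih =>
    intro hr hnr ht hnt hg
    rw [pvEgcdLoop]
    simp only [h, dite_false]
    have hnrpos : 0 < newr := lt_of_le_of_ne hnr (Ne.symm h)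
    have hmod := PySem.Int.floordiv_mul_add_mod r newr
    have hrw : r - PySem.Int.floordiv r newr * newr = PySem.Int.mod r newr := by omega
    refine ih hnrpos ?_ hnt ?_ ?_
    · rw [hrw]; exact PySem.Int.mod_nonneg r hnrpos
    · have : (t - PySem.Int.floordiv r newr * newt) * a0 - (r - PySem.Int.floordiv r newr * newr)
          = (t * a0 - r) - PySem.Int.floordiv r newr * (newt * a0 - newr) := by ring
      rw [this]
      exact dvd_sub ht (Dvd.dvd.mul_left hnt _)
    · rw [hrw, intGcdRec r newr hnrpos]; exact hg

-- A's loop over y = 1..T-1 computes the running max of f together with the FIRST argmax.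
theorem foldArgmax (f : Int → Int) (hf : ∀ y, 0 ≤ f y) (T : Int) (hT : 2 ≤ T) :
    ∃ mx b,
      ((PySem.List.pyRange 1 T 1).foldl
        (fun (acc : Int × Option Int) y =>
          let remainder := f y
          if remainder > acc.1 then (remainder, some y) else acc)
        ((-1 : Int), (none : Option Int))) = (mx, some b) ∧
      1 ≤ b ∧ b < T ∧ f b = mx ∧
      (∀ y, 1 ≤ y → y < b → f y < mx) ∧
      (∀ y, 1 ≤ y → y < T → f y ≤ mx) := by
  induction T, hT using Int.le_induction with
  | base =>
    have hlist : PySem.List.pyRange 1 2 1 = [1] := by decide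
    rw [hlist]
    refine ⟨f 1, 1, ?_, le_refl 1, by omega, rfl, by omega, ?_⟩
    · simp only [List.foldl]
      have : f 1 > (-1 : Int) := by have := hf 1; omega
      simp [this]
    · intro y h1 h2
      have : y = 1 := by omega
      subst this; exact le_refl _
  | succ T hT ih =>
    obtain ⟨mx, b, heq, hb1, hbT, hfb, hlt, hle⟩ := ih
    rw [PySem.List.pyRange_one_succ_right (by omega : (1:Int) ≤ T), List.foldl_append, heq]
    simp only [List.foldl]
    by_cases hc : f T > mx
    · refine ⟨f T, T, ?_, by omega, by omega, rfl, ?_, ?_⟩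
      · simp [hc]
      · intro y h1 h2
        exact lt_of_le_of_lt (hle y h1 (by omega)) hc
      · intro y h1 h2
        have : y < T ∨ y = T := by omega
        rcases this with hy | hy
        · exact le_of_lt (lt_of_le_of_lt (hle y h1 hy) hc)
        · subst hy; exact le_refl _
    · refine ⟨mx, b, ?_, hb1, by omega, hfb, hlt, ?_⟩
      · simp [hc]
      · intro y h1 h2
        have : y < T ∨ y = T := by omega
        rcases this with hy | hy
        · exact hle y h1 hy
        · subst hy; omega

-- (x*y) % 2024 only depends on x % 2024.
theorem pyModMulLeft (x y : Int) :
    PySem.Int.mod (x * y) 2024 = (PySem.Int.mod x 2024 * y) % 2024 := by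
  rw [PySem.Int.mod_eq_emod_of_pos (by norm_num : (0:Int) < 2024),
      PySem.Int.mod_eq_emod_of_pos (by norm_num : (0:Int) < 2024)]
  conv_lhs => rw [Int.mul_emod]
  conv_rhs => rw [Int.mul_emod, Int.emod_emod_of_dvd x dvd_rfl]

-- Characterization of B's closed form when x % 2024 ≠ 0: its value res lies in [1, 2024),
-- attains remainder 2024 - gcd(x % 2024, 2024), no smaller positive y attains it,
-- and no y at all exceeds it.
theorem altChar (x : Int) (hA : PySem.Int.mod x 2024 ≠ 0) :
    1 ≤ calculate_y_alt x ∧ calculate_y_alt x < 2024 ∧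
    PySem.Int.mod (x * calculate_y_alt x) 2024
      = 2024 - (Int.gcd (PySem.Int.mod x 2024) 2024 : Int) ∧
    (∀ y, 1 ≤ y → y < calculate_y_alt x →
      PySem.Int.mod (x * y) 2024 ≠ 2024 - (Int.gcd (PySem.Int.mod x 2024) 2024 : Int)) ∧
    (∀ y, PySem.Int.mod (x * y) 2024 ≤ 2024 - (Int.gcd (PySem.Int.mod x 2024) 2024 : Int)) := by
  have hN : (0:Int) < 2024 := by norm_num
  set a := PySem.Int.mod x 2024 with ha_def
  have ha0 : 0 ≤ a := PySem.Int.mod_nonneg x hN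
  have haN : a < 2024 := PySem.Int.mod_lt x hN
  have hapos : 0 < a := lt_of_le_of_ne ha0 (Ne.symm hA)
  set d : Int := (Int.gcd a 2024 : Int) with hd_def
  have hd_dvd_a : d ∣ a := by rw [hd_def]; exact Int.gcd_dvd_left a 2024
  have hd_dvd_N : d ∣ (2024:Int) := by rw [hd_def]; exact Int.gcd_dvd_right a 2024
  have hgcd_ne : Int.gcd a 2024 ≠ 0 := by
    intro h0
    exact hA (by simpa using (Int.gcd_eq_zero_iff.mp h0).1)
  have hdpos : 0 < d := by
    rw [hd_def]
    exact_mod_cast Nat.pos_of_ne_zero hgcd_ne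
  have hd_le_a : d ≤ a := Int.le_of_dvd hapos hd_dvd_a
  set m : Int := 2024 / d with hm_def
  set a0 : Int := a / d with ha0_def
  have hmd : m * d = 2024 := Int.ediv_mul_cancel hd_dvd_N
  have ha0d : a0 * d = a := Int.ediv_mul_cancel hd_dvd_a
  have hm0 : 0 < m := by nlinarith
  have hm2 : 2 ≤ m := by
    by_contra hcon
    have hm1 : m = 1 := by omega
    rw [hm1, one_mul] at hmd
    omega
  have ha0nn : 0 ≤ a0 := Int.ediv_nonneg ha0 (le_of_lt hdpos)
  have hcop : Int.gcd a0 m = 1 := by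
    have hgpos : 0 < Int.gcd a 2024 := Nat.pos_of_ne_zero hgcd_ne
    simpa [ha0_def, hm_def, hd_def] using Int.gcd_ediv_gcd_ediv_gcd (i := a) (j := 2024) hgpos
  -- unfold B
  have halt : calculate_y_alt x
      = PySem.Int.mod (-(PySem.Int.mod (pvEgcdLoop 0 1 m a0) m)) m := by
    have hgl : pvGcdLoop a 2024 = d := pvGcdLoop_eq a 2024 ha0 (by norm_num)
    have hfl1 : PySem.Int.floordiv 2024 d = m := PySem.Int.floordiv_eq_ediv_of_pos hdpos
    have hfl2 : PySem.Int.floordiv a d = a0 := PySem.Int.floordiv_eq_ediv_of_pos hdpos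
    simp only [calculate_y_alt, ← ha_def, if_neg hA, hgl, hfl1, hfl2]
  set t := pvEgcdLoop 0 1 m a0 with ht_def
  have htinv : m ∣ t * a0 - 1 := by
    refine pvEgcdLoop_inv m a0 0 1 m a0 hm0 ha0nn ⟨-1, by ring⟩ ⟨0, by ring⟩ ?_
    rw [Int.gcd_comm]; exact hcop
  set res := PySem.Int.mod (-(PySem.Int.mod t m)) m with hres_def
  have hres0 : 0 ≤ res := PySem.Int.mod_nonneg _ hm0
  have hresm : res < m := PySem.Int.mod_lt _ hm0
  have hres_cong : m ∣ res * a0 + 1 := by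
    obtain ⟨k, hk⟩ := htinv
    have e1 : PySem.Int.mod t m = t - m * (t / m) := by
      rw [PySem.Int.mod_eq_emod_of_pos hm0, Int.emod_def]
    have e2 : res = -(PySem.Int.mod t m) - m * ((-(PySem.Int.mod t m)) / m) := by
      rw [hres_def, PySem.Int.mod_eq_emod_of_pos hm0, Int.emod_def]
    refine ⟨-k + (t / m - (-(PySem.Int.mod t m)) / m) * a0, ?_⟩
    rw [e2, e1]
    linear_combination -hk
  have hresne : res ≠ 0 := by
    intro h0
    rw [h0] at hres_cong
    simp at hres_cong
    have := Int.le_of_dvd (by norm_num) hres_cong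
    omega
  have hmN : m ≤ 2024 := by nlinarith
  -- the attained value
  have hval : (a * res) % 2024 = 2024 - d := by
    obtain ⟨k2, hk2⟩ := hres_cong
    have hstep : a * res = (2024 - d) + 2024 * (k2 - 1) := by
      linear_combination d * hk2 - res * ha0d + k2 * hmd
    rw [hstep, Int.add_mul_emod_self_left]
    exact Int.emod_eq_of_lt (by omega) (by omega)
  -- upper bound
  have hub : ∀ y : Int, (a * y) % 2024 ≤ 2024 - d := by
    intro y
    have hv0 : 0 ≤ (a * y) % 2024 := Int.emod_nonneg _ (by norm_num)
    have hvN : (a * y) % 2024 < 2024 := Int.emod_lt_of_pos _ (by norm_num)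
    have hdv : d ∣ (a * y) % 2024 := by
      rw [Int.emod_def]
      exact dvd_sub (Dvd.dvd.mul_right hd_dvd_a y) (Dvd.dvd.mul_right hd_dvd_N _)
    obtain ⟨kv, hkv⟩ := hdv
    have hkvm : kv < m := by nlinarith
    have : d * kv ≤ d * (m - 1) :=
      Int.mul_le_mul_of_nonneg_left (by omega) (le_of_lt hdpos)
    nlinarith
  -- minimality
  have hmin : ∀ y : Int, 1 ≤ y → y < res → (a * y) % 2024 ≠ 2024 - d := by
    intro y hy1 hy2 heq
    have hq : a * y = 2024 * ((a * y) / 2024) + (2024 - d) := by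
      have h' := Int.emod_def (a * y) 2024
      omega
    have hdvd : m ∣ a0 * y + 1 := by
      have hcancel : d * (a0 * y + 1) = d * (m * ((a * y) / 2024 + 1)) := by
        linear_combination hq + y * ha0d - ((a * y) / 2024 + 1) * hmd
      have := mul_left_cancel₀ (ne_of_gt hdpos) hcancel
      exact ⟨(a * y) / 2024 + 1, this⟩
    have hdvd2 : m ∣ a0 * (res - y) := by
      have : a0 * (res - y) = (res * a0 + 1) - (a0 * y + 1) := by ring
      rw [this]
      exact dvd_sub hres_cong hdvd
    have hcop' : IsCoprime m a0 := by
      rw [Int.isCoprime_iff_gcd_eq_one, Int.gcd_comm]; exact hcop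
    have hfin : m ∣ res - y := hcop'.dvd_of_dvd_mul_left hdvd2
    have := Int.le_of_dvd (by omega) hfin
    omega
  rw [halt]
  refine ⟨by omega, by omega, ?_, ?_, ?_⟩
  · rw [pyModMulLeft, ← ha_def]; exact hval
  · intro y h1 h2; rw [pyModMulLeft, ← ha_def]; exact hmin y h1 h2
  · intro y; rw [pyModMulLeft, ← ha_def]; exact hub y

-- ===== VERDICT (by name: the statement is the Claim_ definition above) =====
theorem calculate_y_spec : Claim_equal_calculate_y := by
  unfold Claim_equal_calculate_y Spec_calculate_y
  intro x _
  have hN : (0:Int) < 2024 := by norm_num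
  have hf : ∀ y : Int, 0 ≤ PySem.Int.mod (x * y) 2024 := fun y => PySem.Int.mod_nonneg _ hN
  obtain ⟨mx, b, heq, hb1, hbT, hfb, hlt, hle⟩ :=
    foldArgmax (fun y => PySem.Int.mod (x * y) 2024) hf 2024 (by norm_num)
  have hA : calculate_y x = b := by
    simp only [calculate_y, heq, Option.getD_some]
  rw [hA]
  by_cases hz : PySem.Int.mod x 2024 = 0
  · -- x ≡ 0: every remainder is 0, so A picks y = 1 and B returns 1
    have hzero : ∀ y : Int, PySem.Int.mod (x * y) 2024 = 0 := by
      intro y; rw [pyModMulLeft, hz, zero_mul]; norm_num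
    have hmx : mx = 0 := by rw [← hfb, hzero]
    have hb : b = 1 := by
      by_contra hne
      have h1b : (1:Int) < b := by omega
      have := hlt 1 (le_refl 1) h1b
      rw [hzero] at this
      omega
    simp only [calculate_y_alt, if_pos hz]
    exact hb
  · obtain ⟨hr1, hrN, hrval, hrmin, hrub⟩ := altChar x hz
    -- mx = 2024 - d
    have hmx_le : mx ≤ 2024 - (Int.gcd (PySem.Int.mod x 2024) 2024 : Int) := by
      rw [← hfb]; exact hrub b
    have hmx_ge : 2024 - (Int.gcd (PySem.Int.mod x 2024) 2024 : Int) ≤ mx := by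
      have := hle (calculate_y_alt x) hr1 hrN
      omega
    have hmx : mx = 2024 - (Int.gcd (PySem.Int.mod x 2024) 2024 : Int) := le_antisymm hmx_le hmx_ge
    rcases lt_trichotomy b (calculate_y_alt x) with hc | hc | hc
    · exact absurd (hfb.trans hmx) (hrmin b hb1 hc)
    · exact hc
    · have := hlt (calculate_y_alt x) hr1 hc
      omega
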